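-- pv_equiv track=rewrite | github.com/grillcheese123/elephant-coder | .elephant-coder/realworld/existing_repo_20260209T183119Z/scripts/elephant_cli.py | _vector_fingerprint
-- ===== SOURCE A (Python) =====
-- from typing import Any
--
-- def _vector_fingerprint(vec: Any, bits: int = 64) -> str:
--     """Compact fingerprint for a bipolar vector."""
--     n = max(8, bits)
--     raw_bits = "".join("1" if float(vec[i]) > 0 else "0" for i in range(min(n, len(vec))))
--     if len(raw_bits) % 4:
--         raw_bits += "0" * (4 - (len(raw_bits) % 4))
--     hex_chars: list[str] = []
--     for i in range(0, len(raw_bits), 4):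
--         chunk = raw_bits[i : i + 4]
--         hex_chars.append(format(int(chunk, 2), "x"))
--     return "".join(hex_chars)
-- ===== SOURCE B (Python) =====
-- def _vector_fingerprint(vec, bits: int = 64) -> str:
--     """Compact fingerprint for a bipolar vector (group-of-four decomposition)."""
--     m = min(max(8, bits), len(vec))
--     num_nibbles = (m + 3) // 4
--     out = []
--     for j in range(num_nibbles):
--         v = 0
--         for k in range(4 * j, 4 * j + 4):
--             v = v * 2 + (1 if k < m and float(vec[k]) > 0 else 0)
--         out.append(format(v, "x"))
--     return "".join(out)
-- ===== Notes on version B (the rewrite author's own statement) =====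
-- stated objective: alternative
-- what changed: B computes each hex digit directly from its group of four vector positions (zero for positions past the end), eliminating A's intermediate padded bit string and its re-chunking/int(chunk,2) pass.
import Mathlib
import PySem

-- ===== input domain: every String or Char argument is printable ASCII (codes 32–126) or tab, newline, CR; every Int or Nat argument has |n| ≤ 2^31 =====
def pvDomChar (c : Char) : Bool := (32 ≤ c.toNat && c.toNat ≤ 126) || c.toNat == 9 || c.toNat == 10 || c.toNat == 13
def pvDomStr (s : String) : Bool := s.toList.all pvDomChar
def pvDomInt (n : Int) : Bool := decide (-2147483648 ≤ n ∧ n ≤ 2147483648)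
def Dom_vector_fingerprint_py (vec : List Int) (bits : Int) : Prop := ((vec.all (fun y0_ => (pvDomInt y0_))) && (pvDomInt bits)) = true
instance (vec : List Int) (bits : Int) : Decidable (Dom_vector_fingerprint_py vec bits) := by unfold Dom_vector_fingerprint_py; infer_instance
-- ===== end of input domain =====

-- B computes each hex digit directly from its group of four vector positions, eliminating A's
-- intermediate padded bit string and its re-chunking pass (alternative decomposition, same cost).

-- ===== PORT A =====
-- format(v, "x") for v in 0..15 (the only values reached): one lowercase hex digit
def hexChar (v : Nat) : Char := if v < 10 then Char.ofNat (48 + v) else Char.ofNat (87 + v)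

-- Port of A. All indices i fed to vec[i] satisfy 0 ≤ i < len(vec), so pyGetD is exact
-- (Python never raises here); int(chunk, 2) on a '0'/'1' string is the binary-doubling fold.
def vector_fingerprint_py (vec : List Int) (bits : Int) : String :=
  let n : Int := max 8 bits
  let rawBits : List Char :=
    (PySem.List.pyRange 0 (min n ((vec.length : Int))) 1).map
      (fun i => if PySem.List.pyGetD vec i 0 > 0 then '1' else '0')
  let rawBits2 : List Char :=
    if rawBits.length % 4 ≠ 0 then rawBits ++ List.replicate (4 - rawBits.length % 4) '0'
    else rawBits
  let hexChars : List Char :=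
    (PySem.List.pyRange 0 ((rawBits2.length : Nat) : Int) 4).foldl
      (fun acc i =>
        acc ++ [hexChar ((PySem.List.slice rawBits2 (some i) (some (i + 4))).foldl
          (fun a c => 2 * a + (if c = '1' then 1 else 0)) 0)])
      []
  String.ofList hexChars

-- ===== PORT B =====
-- Port of B (Source B): per-nibble direct computation; vec[k] accessed only for k < m, so pyGetD is exact.
def vector_fingerprint_py_alt (vec : List Int) (bits : Int) : String :=
  let m : Int := min (max 8 bits) ((vec.length : Int))
  let numNibbles : Int := PySem.Int.floordiv (m + 3) 4
  let out : List Char :=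
    (PySem.List.pyRange 0 numNibbles 1).foldl
      (fun acc j =>
        acc ++ [hexChar ((PySem.List.pyRange (4 * j) (4 * j + 4) 1).foldl
          (fun v k => v * 2 + (if k < m ∧ PySem.List.pyGetD vec k 0 > 0 then 1 else 0)) 0)])
      []
  String.ofList out

-- ===== PRECONDITION & SPEC =====
def Spec_vector_fingerprint_py (vec : List Int) (bits : Int) (out : String) : Prop := out = vector_fingerprint_py_alt vec bits
instance (vec : List Int) (bits : Int) (out : String) : Decidable (Spec_vector_fingerprint_py vec bits out) := by unfold Spec_vector_fingerprint_py; infer_instance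

-- ===== CLAIM (what is proved, stated in full; the proofs are below) =====
def Claim_equal_vector_fingerprint_py : Prop := ∀ (vec : List Int) (bits : Int), Dom_vector_fingerprint_py vec bits → Spec_vector_fingerprint_py vec bits (vector_fingerprint_py vec bits)

-- ===== LEMMAS AND PROOFS =====

-- range(0, 4*N, 4) enumerates the nibble starts
lemma pyRange_four (N : Nat) :
    PySem.List.pyRange 0 ((4 * N : Nat) : Int) 4 = (List.range N).map (fun k : Nat => 4 * (k : Int)) := by
  rw [PySem.List.pyRange_of_pos _ _ (by norm_num : (0:Int) < 4)]
  rcases Nat.eq_zero_or_pos N with h | h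
  · simp [h]
  · rw [if_pos (by exact_mod_cast Nat.mul_pos (by norm_num) h)]
    have h1 : ((((4 * N : Nat) : Int) - 0 + 4 - 1) / 4).toNat = N := by
      push_cast; omega
    rw [h1]
    exact List.map_congr_left (fun k _ => by ring)

-- a step-1 range of four consecutive ints
lemma pyRange_step1_four (a : Int) :
    PySem.List.pyRange a (a + 4) 1 = [a, a + 1, a + 2, a + 3] := by
  rw [PySem.List.pyRange_one]
  have : (a + 4 - a).toNat = 4 := by omega
  rw [this]
  simp [List.range_succ]

-- a 4-element window of a long-enough list
lemma drop_take_four {α : Type} (c : List α) (i : Nat) (d : α) (h : i + 4 ≤ c.length) :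
    (c.drop i).take 4 = [c.getD i d, c.getD (i+1) d, c.getD (i+2) d, c.getD (i+3) d] := by
  rw [List.drop_eq_getElem_cons (show i < c.length by omega),
      List.drop_eq_getElem_cons (show i + 1 < c.length by omega),
      List.drop_eq_getElem_cons (show i + 1 + 1 < c.length by omega),
      List.drop_eq_getElem_cons (show i + 1 + 1 + 1 < c.length by omega)]
  rw [List.getD_eq_getElem c d (show i < c.length by omega),
      List.getD_eq_getElem c d (show i + 1 < c.length by omega),
      List.getD_eq_getElem c d (show i + 2 < c.length by omega),
      List.getD_eq_getElem c d (show i + 3 < c.length by omega)]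
  simp only [List.take_succ_cons, List.take_zero]

-- element of the padded bit string
lemma padded_getD (b : List Char) (P t : Nat) :
    (b ++ List.replicate P '0').getD t '0' = if t < b.length then b.getD t '0' else '0' := by
  split_ifs with h
  · rw [List.getD_eq_getElem _ _ (by simp; omega), List.getElem_append_left h,
        List.getD_eq_getElem _ _ h]
  · by_cases h2 : t < b.length + P
    · rw [List.getD_eq_getElem _ _ (by simp; omega), List.getElem_append_right (by omega)]
      simp
    · rw [List.getD_eq_default]
      simp; omega

-- a 0/1 bit from its '0'/'1' character
lemma bitval_ite (P : Prop) [Decidable P] :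
    (if (if P then '1' else '0') = '1' then (1:Nat) else 0) = if P then 1 else 0 := by
  split_ifs with h1 h2 <;> simp_all

-- element of the raw bit string
lemma rawBits_getD (f : Int → Char) (m : Int) (t : Nat) (ht : t < m.toNat) (d : Char) :
    ((PySem.List.pyRange 0 m 1).map f).getD t d = f t := by
  have hl : t < ((PySem.List.pyRange 0 m 1).map f).length := by
    simp [PySem.List.length_pyRange_one]; omega
  rw [List.getD_eq_getElem _ _ hl, List.getElem_map, PySem.List.getElem_pyRange_one]
  simp

theorem ab_eq (vec : List Int) (bits : Int) :
    vector_fingerprint_py vec bits = vector_fingerprint_py_alt vec bits := by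
  simp only [vector_fingerprint_py, vector_fingerprint_py_alt]
  set m : Int := min (max 8 bits) ((vec.length : Int)) with hmdef
  have hm0 : 0 ≤ m := by
    have h1 : (0:Int) ≤ (vec.length : Int) := Int.natCast_nonneg _
    have h2 : (8:Int) ≤ max 8 bits := le_max_left _ _
    omega
  set M : Nat := m.toNat with hMdef
  have hmM : m = (M : Int) := by omega
  set f : Int → Char := fun i => if PySem.List.pyGetD vec i 0 > 0 then '1' else '0' with hf
  set rawBits : List Char := (PySem.List.pyRange 0 m 1).map f with hraw
  have hrawlen : rawBits.length = M := by
    rw [hraw, List.length_map, PySem.List.length_pyRange_one]; omega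
  set N : Nat := (M + 3) / 4 with hN
  set rb2 : List Char :=
    if rawBits.length % 4 ≠ 0 then rawBits ++ List.replicate (4 - rawBits.length % 4) '0'
    else rawBits with hrb2
  have hrb2len : rb2.length = 4 * N := by
    rw [hrb2]
    by_cases h4 : rawBits.length % 4 = 0
    · rw [if_neg (by omega)]; omega
    · rw [if_pos (by omega)]
      simp only [List.length_append, List.length_replicate]
      omega
  have hbit : ∀ t : Nat, t < M → rawBits.getD t '0' = f t := by
    intro t ht
    rw [hraw]; exact rawBits_getD f m t (by omega) '0'
  have hrb2get : ∀ t : Nat, t < 4 * N →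
      rb2.getD t '0' = if (t:Int) < m ∧ PySem.List.pyGetD vec (t:Int) 0 > 0 then '1' else '0' := by
    intro t ht
    by_cases h4 : rawBits.length % 4 = 0
    · have h40 : M % 4 = 0 := by omega
      have htM : t < M := by omega
      have htm : (t:Int) < m := by omega
      rw [hrb2, if_neg (by omega), hbit t htM, hf]
      by_cases hp : PySem.List.pyGetD vec (t:Int) 0 > 0 <;> simp [htm]
    · rw [hrb2, if_pos (by omega), padded_getD, hrawlen]
      by_cases htM : t < M
      · have htm : (t:Int) < m := by omega
        rw [if_pos htM, hbit t htM, hf]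
        by_cases hp : PySem.List.pyGetD vec (t:Int) 0 > 0 <;> simp [htm]
      · have htm : ¬ ((t:Int) < m) := by omega
        rw [if_neg htM, if_neg (by tauto)]
  rw [PySem.List.foldl_append_singleton_eq_map, PySem.List.foldl_append_singleton_eq_map]
  simp only [List.nil_append]
  congr 1
  have hA : ((rb2.length : Nat) : Int) = ((4*N : Nat) : Int) := by rw [hrb2len]
  have hB : PySem.Int.floordiv (m + 3) 4 = (N : Int) := by
    rw [PySem.Int.floordiv_eq_ediv_of_pos (by norm_num)]
    have h := Int.natCast_div (M + 3) 4
    rw [hmM, hN]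
    push_cast at h ⊢
    omega
  rw [hA, pyRange_four, hB, PySem.List.pyRange_one]
  simp only [List.map_map, Int.sub_zero, Int.toNat_natCast, Function.comp_def, zero_add]
  apply List.map_congr_left
  intro k hk
  rw [List.mem_range] at hk
  have hsl : PySem.List.slice rb2 (some (4 * (k:Int))) (some (4 * (k:Int) + 4))
      = (rb2.drop (4*k)).take 4 := by
    have h1 : (4 * (k:Int)) = ((4*k : Nat) : Int) := by push_cast; ring
    have h2 : (4 * (k:Int) + 4) = ((4*k : Nat) : Int) + ((4:Nat) : Int) := by push_cast; ring
    rw [h2, h1, PySem.List.slice_natCast_add]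
  rw [hsl, drop_take_four rb2 (4*k) '0' (by rw [hrb2len]; omega), pyRange_step1_four]
  simp only [List.foldl_cons, List.foldl_nil]
  rw [hrb2get (4*k) (by omega), hrb2get (4*k+1) (by omega), hrb2get (4*k+2) (by omega),
      hrb2get (4*k+3) (by omega)]
  simp only [bitval_ite]
  congr 1
  push_cast
  ring

-- ===== VERDICT (by name: the statement is the Claim_ definition above) =====
theorem vector_fingerprint_py_spec : Claim_equal_vector_fingerprint_py := by
  intro vec bits _
  unfold Spec_vector_fingerprint_py
  exact ab_eq vec bits
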